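-- pv_equiv track=rewrite | github.com/AruJoy/algorithm-study | 백준/Gold/16935. 배열 돌리기 3/배열 돌리기 3.py | act_6
-- ===== SOURCE A (Python) =====
-- def act_6(rows, columns, m):
--     new_m = [row[:] for row in m]
--     middle_y, middle_x = rows//2, columns//2
--     start_list = [[0, 0], [middle_y, 0], [middle_y, middle_x], [0, middle_x]]
--     end_list = [[middle_y, 0], [middle_y, middle_x], [0, middle_x], [0, 0]]
--     for i in range(4):
--         start = start_list[i]
--         end = end_list[i]
--         for j in range(middle_y):
--             for k in range(middle_x):
--                 new_m[end[0] + j][end[1] + k] = m[start[0] + j][start[1] + k]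
--     return new_m
-- ===== SOURCE B (Python) =====
-- def act_6(rows, columns, m):
--     my, mx = rows // 2, columns // 2
--
--     def src(r, c):
--         if 0 <= r < my and 0 <= c < mx:
--             return r, mx + c
--         if 0 <= r < my and mx <= c < 2 * mx:
--             return my + r, c
--         if my <= r < 2 * my and 0 <= c < mx:
--             return r - my, c
--         if my <= r < 2 * my and mx <= c < 2 * mx:
--             return r, c - mx
--         return r, c
--
--     def val(r, c):
--         sr, sc = src(r, c)
--         return m[sr][sc]
--
--     return [[val(r, c) for c in range(len(row))] for r, row in enumerate(m)]
-- ===== Notes on version B (the rewrite author's own statement) =====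
-- stated objective: alternative
-- what changed: B builds the result in a single gather pass, computing each output cell's source coordinate directly from the quadrant 4-cycle, instead of A's four scatter copy loops driven by a start/end quadrant table over a copied buffer.
import Mathlib
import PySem

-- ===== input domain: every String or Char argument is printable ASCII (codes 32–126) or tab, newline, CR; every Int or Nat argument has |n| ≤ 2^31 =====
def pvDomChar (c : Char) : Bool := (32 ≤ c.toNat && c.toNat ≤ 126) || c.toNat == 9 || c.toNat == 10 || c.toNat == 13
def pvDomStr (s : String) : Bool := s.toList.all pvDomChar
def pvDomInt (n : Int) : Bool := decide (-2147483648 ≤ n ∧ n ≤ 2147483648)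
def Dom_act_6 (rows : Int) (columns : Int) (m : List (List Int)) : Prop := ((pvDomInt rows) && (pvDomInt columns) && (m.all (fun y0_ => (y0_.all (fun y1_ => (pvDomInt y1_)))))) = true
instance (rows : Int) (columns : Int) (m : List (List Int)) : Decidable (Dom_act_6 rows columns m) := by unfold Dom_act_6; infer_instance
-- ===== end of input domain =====

-- B builds the result in one gather pass (each output cell computes its source coordinate
-- directly) instead of A's four scatter copy loops over a start/end quadrant table; objective: alternative.

-- ===== PORT A =====
-- m[r][c] read; the default 0 is never observed on inputs satisfying Pre_act_6 (Python raises there)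
def pvGetCell (mm : List (List Int)) (r c : Nat) : Int := (mm.getD r []).getD c 0
-- new_m[r][c] = v; out-of-range is a no-op (Python raises there; excluded by Pre_act_6)
def pvSetCell (mm : List (List Int)) (r c : Nat) (v : Int) : List (List Int) :=
  mm.set r ((mm.getD r []).set c v)
-- inner loop 'for k in range(middle_x)'; all indices are nonnegative whenever the loop body runs
def pvWriteRow (m acc : List (List Int)) (e0 e1 s0 s1 j X : Nat) : List (List Int) :=
  (List.range X).foldl (fun a k => pvSetCell a (e0 + j) (e1 + k) (pvGetCell m (s0 + j) (s1 + k))) acc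
-- middle loop 'for j in range(middle_y)'
def pvWriteBlock (m acc : List (List Int)) (e0 e1 s0 s1 M X : Nat) : List (List Int) :=
  (List.range M).foldl (fun a j => pvWriteRow m a e0 e1 s0 s1 j X) acc

def act_6 (rows : Int) (columns : Int) (m : List (List Int)) : List (List Int) :=
  let new_m := m.map (fun row => row)
  let middle_y := PySem.Int.floordiv rows 2
  let middle_x := PySem.Int.floordiv columns 2
  let start_list : List (Int × Int) := [(0, 0), (middle_y, 0), (middle_y, middle_x), (0, middle_x)]
  let end_list : List (Int × Int) := [(middle_y, 0), (middle_y, middle_x), (0, middle_x), (0, 0)]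
  (List.range 4).foldl (fun acc i =>
    let s := start_list.getD i (0, 0)
    let e := end_list.getD i (0, 0)
    pvWriteBlock m acc e.1.toNat e.2.toNat s.1.toNat s.2.toNat middle_y.toNat middle_x.toNat) new_m

-- ===== PORT B =====
-- source coordinate of output cell (r, c): the quadrant 4-cycle, else the cell itself
def pvSrc (my mx r c : Int) : Int × Int :=
  if 0 ≤ r ∧ r < my ∧ 0 ≤ c ∧ c < mx then (r, mx + c)
  else if 0 ≤ r ∧ r < my ∧ mx ≤ c ∧ c < 2 * mx then (my + r, c)
  else if my ≤ r ∧ r < 2 * my ∧ 0 ≤ c ∧ c < mx then (r - my, c)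
  else if my ≤ r ∧ r < 2 * my ∧ mx ≤ c ∧ c < 2 * mx then (r, c - mx)
  else (r, c)

def act_6_alt (rows : Int) (columns : Int) (m : List (List Int)) : List (List Int) :=
  let my := PySem.Int.floordiv rows 2
  let mx := PySem.Int.floordiv columns 2
  m.mapIdx (fun r row => row.mapIdx (fun c _ =>
    let p := pvSrc my mx (r : Int) (c : Int)
    -- sources are nonnegative; in range on Pre_act_6 (Python raises otherwise)
    pvGetCell m p.1.toNat p.2.toNat))

-- ===== PRECONDITION & SPEC =====
-- Pre_act_6 is exactly where Python A returns: if both half-sizes are positive, the matrix must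
-- have at least 2*(rows//2) rows and each of those rows at least 2*(columns//2) entries,
-- otherwise A's indexing raises IndexError.
def Pre_act_6 (rows : Int) (columns : Int) (m : List (List Int)) : Prop :=
  PySem.Int.floordiv rows 2 ≤ 0 ∨ PySem.Int.floordiv columns 2 ≤ 0 ∨
    (2 * PySem.Int.floordiv rows 2 ≤ (m.length : Int) ∧
      ∀ row ∈ m.take (2 * PySem.Int.floordiv rows 2).toNat,
        2 * PySem.Int.floordiv columns 2 ≤ (row.length : Int))
instance (rows : Int) (columns : Int) (m : List (List Int)) : Decidable (Pre_act_6 rows columns m) := by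
  unfold Pre_act_6; infer_instance

def pvWitness_act_6 : Int × Int × List (List Int) := (2, 2, [[1, 2], [3, 4]])

def Spec_act_6 (rows : Int) (columns : Int) (m : List (List Int)) (out : List (List Int)) : Prop := out = act_6_alt rows columns m
instance (rows : Int) (columns : Int) (m : List (List Int)) (out : List (List Int)) : Decidable (Spec_act_6 rows columns m out) := by unfold Spec_act_6; infer_instance

-- ===== CLAIM (what is proved, stated in full; the proofs are below) =====
def Claim_equal_act_6 : Prop := ∀ (rows : Int) (columns : Int) (m : List (List Int)), Dom_act_6 rows columns m → Pre_act_6 rows columns m → Spec_act_6 rows columns m (act_6 rows columns m)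

-- ===== LEMMAS AND PROOFS =====

def pvRowLen (mm : List (List Int)) (r : Nat) : Nat := (mm.getD r []).length

theorem pv_getD_set {α : Type} (l : List α) (i j : Nat) (a d : α) :
    (l.set i a).getD j d = if i = j ∧ i < l.length then a else l.getD j d := by
  simp only [List.getD, List.getElem?_set]
  split_ifs with h1 h2 h3 h3 <;> (simp_all; try omega)

theorem pvSetCell_length (mm : List (List Int)) (r c : Nat) (v : Int) :
    (pvSetCell mm r c v).length = mm.length := by simp [pvSetCell]

theorem pvSetCell_rowLen (mm : List (List Int)) (r c : Nat) (v : Int) (t : Nat) :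
    pvRowLen (pvSetCell mm r c v) t = pvRowLen mm t := by
  unfold pvRowLen pvSetCell
  rw [pv_getD_set]
  split_ifs with h
  · obtain ⟨rfl, _⟩ := h; simp
  · rfl

theorem pv_getCell_setCell (mm : List (List Int)) (r c : Nat) (v : Int) (r' c' : Nat) :
    pvGetCell (pvSetCell mm r c v) r' c' =
      if r = r' ∧ c = c' ∧ r < mm.length ∧ c < pvRowLen mm r then v
      else pvGetCell mm r' c' := by
  unfold pvGetCell pvSetCell pvRowLen
  rw [pv_getD_set]
  by_cases hr : r = r' ∧ r < mm.length
  · obtain ⟨rfl, hlt⟩ := hr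
    rw [if_pos ⟨rfl, hlt⟩, pv_getD_set]
    split_ifs with h1 h2 h2 <;> first | rfl | omega
  · rw [if_neg hr]
    split_ifs with h
    · exact absurd ⟨h.1, h.2.2.1⟩ hr
    · rfl

theorem pvWriteRow_succ (m acc : List (List Int)) (e0 e1 s0 s1 j X : Nat) :
    pvWriteRow m acc e0 e1 s0 s1 j (X + 1) =
      pvSetCell (pvWriteRow m acc e0 e1 s0 s1 j X) (e0 + j) (e1 + X) (pvGetCell m (s0 + j) (s1 + X)) := by
  unfold pvWriteRow
  rw [List.range_succ, List.foldl_append]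
  rfl

theorem pvWriteRow_length (m acc : List (List Int)) (e0 e1 s0 s1 j X : Nat) :
    (pvWriteRow m acc e0 e1 s0 s1 j X).length = acc.length := by
  induction X with
  | zero => rfl
  | succ X ih => rw [pvWriteRow_succ, pvSetCell_length, ih]

theorem pvWriteRow_rowLen (m acc : List (List Int)) (e0 e1 s0 s1 j X t : Nat) :
    pvRowLen (pvWriteRow m acc e0 e1 s0 s1 j X) t = pvRowLen acc t := by
  induction X with
  | zero => rfl
  | succ X ih => rw [pvWriteRow_succ, pvSetCell_rowLen, ih]

theorem pv_getCell_writeRow (m acc : List (List Int)) (e0 e1 s0 s1 j X r c : Nat) :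
    pvGetCell (pvWriteRow m acc e0 e1 s0 s1 j X) r c =
      if r = e0 + j ∧ e1 ≤ c ∧ c < e1 + X ∧ r < acc.length ∧ c < pvRowLen acc r then
        pvGetCell m (s0 + j) (s1 + (c - e1))
      else pvGetCell acc r c := by
  induction X with
  | zero =>
      simp only [pvWriteRow, List.range_zero, List.foldl_nil]
      rw [if_neg (by omega)]
  | succ X ih =>
      rw [pvWriteRow_succ, pv_getCell_setCell, pvWriteRow_length, pvWriteRow_rowLen, ih]
      by_cases hre : r = e0 + j
      · subst hre
        split_ifs <;> first | rfl | omega | (congr 1; omega)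
      · split_ifs <;> first | rfl | omega

theorem pvWriteBlock_succ (m acc : List (List Int)) (e0 e1 s0 s1 M X : Nat) :
    pvWriteBlock m acc e0 e1 s0 s1 (M + 1) X =
      pvWriteRow m (pvWriteBlock m acc e0 e1 s0 s1 M X) e0 e1 s0 s1 M X := by
  unfold pvWriteBlock
  rw [List.range_succ, List.foldl_append]
  rfl

theorem pvWriteBlock_length (m acc : List (List Int)) (e0 e1 s0 s1 M X : Nat) :
    (pvWriteBlock m acc e0 e1 s0 s1 M X).length = acc.length := by
  induction M with
  | zero => rfl
  | succ M ih => rw [pvWriteBlock_succ, pvWriteRow_length, ih]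

theorem pvWriteBlock_rowLen (m acc : List (List Int)) (e0 e1 s0 s1 M X t : Nat) :
    pvRowLen (pvWriteBlock m acc e0 e1 s0 s1 M X) t = pvRowLen acc t := by
  induction M with
  | zero => rfl
  | succ M ih => rw [pvWriteBlock_succ, pvWriteRow_rowLen, ih]

theorem pv_getCell_writeBlock (m acc : List (List Int)) (e0 e1 s0 s1 M X r c : Nat) :
    pvGetCell (pvWriteBlock m acc e0 e1 s0 s1 M X) r c =
      if e0 ≤ r ∧ r < e0 + M ∧ e1 ≤ c ∧ c < e1 + X ∧ r < acc.length ∧ c < pvRowLen acc r then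
        pvGetCell m (s0 + (r - e0)) (s1 + (c - e1))
      else pvGetCell acc r c := by
  induction M with
  | zero =>
      simp only [pvWriteBlock, List.range_zero, List.foldl_nil]
      rw [if_neg (by omega)]
  | succ M ih =>
      rw [pvWriteBlock_succ, pv_getCell_writeRow, pvWriteBlock_length, pvWriteBlock_rowLen, ih]
      split_ifs with h1 h2 h2 <;> first | rfl | omega | (congr 1 <;> omega)

theorem pv_rowlen_eq (mm : List (List Int)) (r : Nat) (h : r < mm.length) :
    mm[r].length = pvRowLen mm r := by
  unfold pvRowLen
  rw [List.getD, List.getElem?_eq_getElem h]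
  rfl

theorem pv_cell_eq (mm : List (List Int)) (r c : Nat) (h1 : r < mm.length) (h2 : c < mm[r].length) :
    mm[r][c] = pvGetCell mm r c := by
  unfold pvGetCell
  rw [show mm.getD r [] = mm[r] from by rw [List.getD, List.getElem?_eq_getElem h1]; rfl]
  rw [List.getD, List.getElem?_eq_getElem h2]
  rfl

theorem act_6_unfold (rows columns : Int) (m : List (List Int)) :
    act_6 rows columns m =
      pvWriteBlock m (pvWriteBlock m (pvWriteBlock m (pvWriteBlock m (m.map (fun row => row)) (PySem.Int.floordiv rows 2).toNat 0 0 0 (PySem.Int.floordiv rows 2).toNat (PySem.Int.floordiv columns 2).toNat) (PySem.Int.floordiv rows 2).toNat (PySem.Int.floordiv columns 2).toNat (PySem.Int.floordiv rows 2).toNat 0 (PySem.Int.floordiv rows 2).toNat (PySem.Int.floordiv columns 2).toNat) 0 (PySem.Int.floordiv columns 2).toNat (PySem.Int.floordiv rows 2).toNat (PySem.Int.floordiv columns 2).toNat (PySem.Int.floordiv rows 2).toNat (PySem.Int.floordiv columns 2).toNat) 0 0 0 (PySem.Int.floordiv columns 2).toNat (PySem.Int.floordiv rows 2).toNat (PySem.Int.floordiv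 columns 2).toNat := rfl

theorem act_6_alt_unfold (rows columns : Int) (m : List (List Int)) :
    act_6_alt rows columns m =
      m.mapIdx (fun r row => row.mapIdx (fun c _ =>
        pvGetCell m (pvSrc (PySem.Int.floordiv rows 2) (PySem.Int.floordiv columns 2) (r : Int) (c : Int)).1.toNat
          (pvSrc (PySem.Int.floordiv rows 2) (PySem.Int.floordiv columns 2) (r : Int) (c : Int)).2.toNat)) := rfl

theorem pvBig_eq (m : List (List Int)) (my mx : Int) :
    pvWriteBlock m (pvWriteBlock m (pvWriteBlock m (pvWriteBlock m m my.toNat 0 0 0 my.toNat mx.toNat) my.toNat mx.toNat my.toNat 0 my.toNat mx.toNat) 0 mx.toNat my.toNat mx.toNat my.toNat mx.toNat) 0 0 0 mx.toNat my.toNat mx.toNat =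
      m.mapIdx (fun r row => row.mapIdx (fun c _ =>
        pvGetCell m (pvSrc my mx (r : Int) (c : Int)).1.toNat (pvSrc my mx (r : Int) (c : Int)).2.toNat)) := by
  apply List.ext_getElem
  · simp [pvWriteBlock_length]
  · intro r hr1 hr2
    have hrlen : r < m.length := by simpa [pvWriteBlock_length] using hr1
    apply List.ext_getElem
    · rw [pv_rowlen_eq _ _ hr1]
      simp only [pvWriteBlock_rowLen, List.getElem_mapIdx, List.length_mapIdx]
      rw [pv_rowlen_eq _ _ hrlen]
    · intro c hc1 hc2
      have hclen : c < m[r].length := by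
        simpa using hc2
      rw [pv_cell_eq _ _ _ hr1 (by simpa using hc1)]
      simp only [List.getElem_mapIdx]
      rw [pv_getCell_writeBlock, pv_getCell_writeBlock, pv_getCell_writeBlock, pv_getCell_writeBlock]
      simp only [pvWriteBlock_length, pvWriteBlock_rowLen]
      have hclen' : c < pvRowLen m r := by rwa [pv_rowlen_eq _ _ hrlen] at hclen
      unfold pvSrc
      split_ifs <;> dsimp only <;> first | rfl | omega | (congr 1 <;> omega)

-- ===== VERDICT (by name: the statement is the Claim_ definition above) =====
theorem act_6_spec : Claim_equal_act_6 := by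
  intro rows columns m _ _
  unfold Spec_act_6
  rw [act_6_unfold, act_6_alt_unfold, List.map_id']
  exact pvBig_eq m (PySem.Int.floordiv rows 2) (PySem.Int.floordiv columns 2)
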